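-- pv_equiv track=rewrite | github.com/eeveetza/Py1546 | src/Py1546/P1546.py | search_closest
-- ===== SOURCE A (Python) =====
-- def search_closest(x, v):
--     """
--     The following code tidbit is by Dr. Murtaza Khan, modified to return
--     vector y instead of index i if no exact value found. Also added
--     functionality for when v is outside of vector x min and max.
--     23 May 2007 (Updated 09 Jul 2009)
--     Obtained from http://www.mathworks.com/matlabcentral/fileexchange/15088
--
--     Algorithm
--     First binary search is used to find v in x. If not found
--     then range obtained by binary search is searched linearly
--     to find the closest value.
--
--     INPUT:
--     x: vector of numeric values,
--     x should already be sorted in ascending order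
--         (e.g. 2,7,20,...120)
--     v: numeric value to be search in x
--
--     OUTPUT:
--     i: lower or equal value to v in x
--     cv: value that is equal or higher to v in x
--
--     Rev   Date        Author                          Description
--     -------------------------------------------------------------------------------
--     v3    04DEC13     Ivica Stevanovic, OFCOM          Initial python version
--     v1    09JUL09     Jef Satham, Industry Canada      Initial searclosest version
--     v0                Murzaza Khan, drkhanmurtaza@gmail.com   Initial tidbit version
--
--     """
--
--     if x[-1] < v:
--         i = [x[-2], x[-1]]
--         cv = i[1]
--         i = i[0]
--         return i, cv
--     elif x[0] > v:
--         i = [x[0], x[1]]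
--         cv = i[1]
--         i = i[0]
--         return i, cv
--
--     fr = 0
--     to = len(x) - 1
--
--     ##Phase 1: Binary Search
--     while fr <= to:
--         mid = int(round((fr + to) / 2.0))
--
--         diff = x[mid] - v
--         if diff == 0:
--             i = v
--             cv = v
--             return i, cv
--         elif diff < 0:  # % x(mid) < v
--             fr = mid + 1
--         else:  # x(mid) > v
--             to = mid - 1
--
--     i = [x[to], x[fr]]
--     cv = i[1]
--     i = i[0]
--     return i, cv
-- ===== SOURCE B (Python) =====
-- def search_closest(x, v):
--     if x[-1] < v:
--         return x[-2], x[-1]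
--     if x[0] > v:
--         return x[0], x[1]
--     prev = x[0]
--     for y in x:
--         if y >= v:
--             return (v, v) if y == v else (prev, y)
--         prev = y
-- ===== Notes on version B (the rewrite author's own statement) =====
-- stated objective: simpler
-- what changed: Replaces the binary search (with int(round(...)) banker's-rounding midpoint) by a single forward scan that keeps the previous element and returns at the first element >= v; the out-of-range guards are kept as written. Pre_ excludes unsorted lists whose v lies inside the end values, where A's binary search returns accidental values (x is documented as 'already sorted in ascending order'), and the length<=1 inputs on which A raises IndexError (except [v]).
-- outside the precondition, e.g. on search_closest([1, 5, 2, 6], 3): A returns (2, 6), B returns (1, 5)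
import Mathlib
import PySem

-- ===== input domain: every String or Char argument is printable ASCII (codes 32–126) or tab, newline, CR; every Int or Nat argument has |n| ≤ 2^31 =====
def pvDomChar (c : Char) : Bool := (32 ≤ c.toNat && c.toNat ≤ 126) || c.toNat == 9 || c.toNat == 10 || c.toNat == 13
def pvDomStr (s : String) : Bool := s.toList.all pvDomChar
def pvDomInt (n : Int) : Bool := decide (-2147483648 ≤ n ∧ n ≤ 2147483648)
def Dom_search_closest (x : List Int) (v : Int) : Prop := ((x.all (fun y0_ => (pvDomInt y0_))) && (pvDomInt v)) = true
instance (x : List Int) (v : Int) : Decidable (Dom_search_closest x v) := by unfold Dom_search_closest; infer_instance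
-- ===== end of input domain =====

-- B replaces A's binary search by a single forward scan keeping the previous element (simpler, no
-- midpoint rounding); the two out-of-range guards are kept as written.

-- ===== PORT A =====
-- mid = int(round((lo + hi) / 2.0)): Python's round is half-to-even; exact for the nonnegative
-- lo + hi this loop reaches (hand-ported: banker's rounding of s/2 over the integers).
def pvMid (s : Int) : Int :=
  if s % 2 = 0 then s / 2
  else if (s / 2) % 2 = 0 then s / 2 else s / 2 + 1

-- cited by searchLoop's decreasing_by
theorem pvMid_bounds (lo hi : Int) (h : lo ≤ hi) :
    lo ≤ pvMid (lo + hi) ∧ pvMid (lo + hi) ≤ hi := by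
  unfold pvMid; split_ifs <;> omega

-- the 'while lo <= hi' loop; indexing via pyGetD (always in range when reached under Pre_)
def searchLoop (x : List Int) (v lo hi : Int) : Int × Int :=
  if h : lo ≤ hi then
    let mid := pvMid (lo + hi)
    let diff := PySem.List.pyGetD x mid 0 - v
    if diff = 0 then (v, v)
    else if diff < 0 then searchLoop x v (mid + 1) hi
    else searchLoop x v lo (mid - 1)
  else (PySem.List.pyGetD x hi 0, PySem.List.pyGetD x lo 0)
termination_by (hi - lo + 1).toNat
decreasing_by
  · have hb := pvMid_bounds lo hi h; omega
  · have hb := pvMid_bounds lo hi h; omega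

def search_closest (x : List Int) (v : Int) : Int × Int :=
  if PySem.List.pyGetD x (-1) 0 < v then
    (PySem.List.pyGetD x (-2) 0, PySem.List.pyGetD x (-1) 0)
  else if PySem.List.pyGetD x 0 0 > v then
    (PySem.List.pyGetD x 0 0, PySem.List.pyGetD x 1 0)
  else
    searchLoop x v 0 ((x.length : Int) - 1)

-- ===== PORT B =====
-- 'for y in x' keeping prev; the [] case is unreachable under Pre_ (the guard ensures x[-1] ≥ v)
def scanLoop (v prev : Int) : List Int → Int × Int
  | [] => (prev, prev)
  | y :: ys => if v ≤ y then (if y = v then (v, v) else (prev, y)) else scanLoop v y ys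

def search_closest_alt (x : List Int) (v : Int) : Int × Int :=
  if PySem.List.pyGetD x (-1) 0 < v then
    (PySem.List.pyGetD x (-2) 0, PySem.List.pyGetD x (-1) 0)
  else if PySem.List.pyGetD x 0 0 > v then
    (PySem.List.pyGetD x 0 0, PySem.List.pyGetD x 1 0)
  else
    scanLoop v (PySem.List.pyGetD x 0 0) x

-- ===== PRECONDITION & SPEC =====
-- Pre_ excludes len(x) ≤ 1 (where A raises IndexError in a guard) except x = [v], the one
-- singleton A accepts; and, when v lies between x's first and last element (so the identical
-- out-of-range guards of A and B do not fire), it requires x sorted ascending — the function's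
-- documented contract ("x should already be sorted in ascending order"); on unsorted input
-- reaching the loop A's binary search returns accidental values no direct method matches.
def Pre_search_closest (x : List Int) (v : Int) : Prop :=
  (2 ≤ x.length ∨ x = [v]) ∧
  (List.Pairwise (· ≤ ·) x ∨ x.getD (x.length - 1) 0 < v ∨ v < x.getD 0 0)
instance (x : List Int) (v : Int) : Decidable (Pre_search_closest x v) := by
  unfold Pre_search_closest; infer_instance

def pvWitness_search_closest : List Int × Int := ([1, 3], 2)

def Spec_search_closest (x : List Int) (v : Int) (out : Int × Int) : Prop := out = search_closest_alt x v
instance (x : List Int) (v : Int) (out : Int × Int) : Decidable (Spec_search_closest x v out) := by unfold Spec_search_closest; infer_instance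

-- ===== CLAIM (what is proved, stated in full; the proofs are below) =====
def Claim_equal_search_closest : Prop := ∀ (x : List Int) (v : Int), Dom_search_closest x v → Pre_search_closest x v → Spec_search_closest x v (search_closest x v)

-- ===== LEMMAS AND PROOFS =====

-- sortedness as monotonicity of getD
theorem pv_sorted_getD_mono (x : List Int) (hs : List.Pairwise (· ≤ ·) x) {i j : Nat}
    (hij : i ≤ j) (hj : j < x.length) : x.getD i 0 ≤ x.getD j 0 := by
  rcases Nat.lt_or_ge i j with hlt | hge
  · have := List.pairwise_iff_getElem.1 hs i j (Nat.lt_trans hlt hj) hj hlt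
    rwa [List.getD_eq_getElem x 0 (Nat.lt_trans hlt hj), List.getD_eq_getElem x 0 hj]
  · have : i = j := Nat.le_antisymm hij hge
    simp [this]

-- the common result shape: k the first index with x[k] ≥ v
def pvE (x : List Int) (v : Int) (k : Nat) : Int × Int :=
  if x.getD k 0 = v then (v, v) else (x.getD (k - 1) 0, x.getD k 0)

theorem pv_exists_bracket (x : List Int) (v : Int) (hn : 1 ≤ x.length)
    (hlast : v ≤ x.getD (x.length - 1) 0) :
    ∃ k, k < x.length ∧ (∀ i < k, x.getD i 0 < v) ∧ v ≤ x.getD k 0 := by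
  have hex : ∃ k, v ≤ x.getD k 0 := ⟨x.length - 1, hlast⟩
  refine ⟨Nat.find hex, ?_, ?_, Nat.find_spec hex⟩
  · have : Nat.find hex ≤ x.length - 1 := Nat.find_le hlast
    omega
  · intro i hi
    have := Nat.find_min hex hi
    omega

theorem pv_scanLoop_eq (v : Int) :
    ∀ (l : List Int) (prev : Int) (k : Nat), k < l.length →
    (∀ i < k, l.getD i 0 < v) → v ≤ l.getD k 0 →
    scanLoop v prev l =
      (if l.getD k 0 = v then (v, v) else ((prev :: l).getD k 0, l.getD k 0)) := by
  intro l
  induction l with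
  | nil => intro prev k hk _ _; simp at hk
  | cons y ys ih =>
    intro prev k hk hlow hge
    by_cases hy : v ≤ y
    · have hk0 : k = 0 := by
        by_contra h
        have := hlow 0 (by omega)
        simp at this; omega
      subst hk0
      simp only [scanLoop, if_pos hy, List.getD_cons_zero]
    · have hk0 : k ≠ 0 := by rintro rfl; simp at hge; omega
      obtain ⟨k', rfl⟩ : ∃ k', k = k' + 1 := ⟨k - 1, by omega⟩
      have := ih y k' (by simpa using hk)
        (fun i hi => by simpa using hlow (i + 1) (by omega))
        (by simpa using hge)
      simp only [scanLoop, if_neg hy, this, List.getD_cons_succ]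

-- A's loop equals pvE k under the binary-search invariant
theorem pv_searchLoop_eq (x : List Int) (v : Int) (hs : List.Pairwise (· ≤ ·) x)
    (k : Nat) (hk : k < x.length) (hklow : ∀ i < k, x.getD i 0 < v) (hkge : v ≤ x.getD k 0)
    (h0 : x.getD 0 0 ≤ v) (hn : 1 ≤ x.length) :
    ∀ (N : Nat) (lo hi : Int), (hi + 1 - lo).toNat ≤ N → 0 ≤ lo →
    hi < (x.length : Int) → lo ≤ hi + 1 →
    (∀ i : Nat, (i : Int) < lo → x.getD i 0 < v) →
    (∀ i : Nat, hi < (i : Int) → i < x.length → v < x.getD i 0) →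
    searchLoop x v lo hi = pvE x v k := by
  have exit : ∀ (lo hi : Int), lo = hi + 1 → 0 ≤ lo → hi < (x.length : Int) →
      (∀ i : Nat, (i : Int) < lo → x.getD i 0 < v) →
      (∀ i : Nat, hi < (i : Int) → i < x.length → v < x.getD i 0) →
      (PySem.List.pyGetD x hi 0, PySem.List.pyGetD x lo 0) = pvE x v k := by
    intro lo hi hfr hfr0 hton hlow hhigh
    have hfrk : lo ≤ (k : Int) := by
      by_contra h
      exact absurd hkge (not_le.2 (hlow k (by omega)))
    have hkfr : (k : Int) ≤ lo := by
      by_contra h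
      have hfrn : lo.toNat < x.length := by omega
      have h1 := hhigh lo.toNat (by omega) hfrn
      have h2 := hklow lo.toNat (by omega)
      omega
    have hkf : (k : Int) = lo := le_antisymm hkfr hfrk
    have hk1 : 1 ≤ k := by
      by_contra h
      have hk0 : k = 0 := by omega
      have := hhigh 0 (by omega) (by omega)
      omega
    have hto : hi = ((k - 1 : Nat) : Int) := by omega
    have hfr' : lo = ((k : Nat) : Int) := by omega
    rw [hto, hfr', PySem.List.pyGetD_natCast, PySem.List.pyGetD_natCast]
    have hxk : v < x.getD k 0 := hhigh k (by omega) hk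
    unfold pvE
    rw [if_neg (by omega)]
  intro N
  induction N with
  | zero =>
    intro lo hi hN hfr0 hton hfrto hlow hhigh
    have hfr : lo = hi + 1 := by omega
    rw [searchLoop, dif_neg (by omega)]
    exact exit lo hi hfr hfr0 hton hlow hhigh
  | succ N ih =>
    intro lo hi hN hfr0 hton hfrto hlow hhigh
    by_cases hif : lo ≤ hi
    · rw [searchLoop, dif_pos hif]
      obtain ⟨hm1, hm2⟩ := pvMid_bounds lo hi hif
      set m := pvMid (lo + hi) with hm
      have hmn : m.toNat < x.length := by omega
      have hmt : m = ((m.toNat : Nat) : Int) := by omega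
      have hgm : PySem.List.pyGetD x m 0 = x.getD m.toNat 0 := by
        conv_lhs => rw [hmt]
        rw [PySem.List.pyGetD_natCast]
      simp only [hgm]
      by_cases hd0 : x.getD m.toNat 0 - v = 0
      · rw [if_pos hd0]
        have hxm : x.getD m.toNat 0 = v := by omega
        have hxkv : x.getD k 0 = v := by
          rcases Nat.lt_or_ge m.toNat k with h | h
          · have := hklow m.toNat h
            omega
          · have := pv_sorted_getD_mono x hs h hmn
            omega
        unfold pvE; rw [if_pos hxkv]
      · rw [if_neg hd0]
        by_cases hdneg : x.getD m.toNat 0 - v < 0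
        · rw [if_pos hdneg]
          refine ih (m + 1) hi (by omega) (by omega) hton (by omega)
            (fun i hi => ?_) hhigh
          have hi' : i ≤ m.toNat := by omega
          have := pv_sorted_getD_mono x hs hi' hmn
          omega
        · rw [if_neg hdneg]
          refine ih lo (m - 1) (by omega) hfr0 (by omega) (by omega) hlow
            (fun i hi hin => ?_)
          have hi' : m.toNat ≤ i := by omega
          have := pv_sorted_getD_mono x hs hi' hin
          omega
    · rw [searchLoop, dif_neg hif]
      exact exit lo hi (by omega) hfr0 hton hlow hhigh

-- ===== VERDICT (by name: the statement is the Claim_ definition above) =====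
theorem search_closest_spec : Claim_equal_search_closest := by
  unfold Claim_equal_search_closest
  intro x v _ hpre
  obtain ⟨hlen, hsg⟩ := hpre
  have hn : 1 ≤ x.length := by
    rcases hlen with h | h
    · omega
    · simp [h]
  have hne : x ≠ [] := by intro h; simp [h] at hn
  unfold Spec_search_closest search_closest search_closest_alt
  by_cases g1 : PySem.List.pyGetD x (-1) 0 < v
  · rw [if_pos g1, if_pos g1]
  · rw [if_neg g1, if_neg g1]
    by_cases g2 : PySem.List.pyGetD x 0 0 > v
    · rw [if_pos g2, if_pos g2]
    · rw [if_neg g2, if_neg g2]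
      have hlastD : PySem.List.pyGetD x (-1) 0 = x.getD (x.length - 1) 0 := by
        rw [PySem.List.pyGetD_neg_one x 0 hne, List.getLast_eq_getElem,
          List.getD_eq_getElem x 0 (by omega)]
      have h0D : PySem.List.pyGetD x 0 0 = x.getD 0 0 := by
        simpa using PySem.List.pyGetD_natCast x 0 0
      have hlast : v ≤ x.getD (x.length - 1) 0 := by rw [hlastD] at g1; omega
      have h0 : x.getD 0 0 ≤ v := by rw [h0D] at g2; omega
      have hs : List.Pairwise (· ≤ ·) x := by
        rcases hsg with h | h | h
        · exact h
        · omega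
        · omega
      obtain ⟨k, hk, hklow, hkge⟩ := pv_exists_bracket x v hn hlast
      have hA : searchLoop x v 0 ((x.length : Int) - 1) = pvE x v k := by
        refine pv_searchLoop_eq x v hs k hk hklow hkge h0 hn x.length 0
          ((x.length : Int) - 1) (by omega) (by omega) (by omega) (by omega)
          (fun i hi => by omega) (fun i hi hin => by omega)
      have hB : scanLoop v (PySem.List.pyGetD x 0 0) x = pvE x v k := by
        rw [pv_scanLoop_eq v x (PySem.List.pyGetD x 0 0) k hk hklow hkge]
        unfold pvE
        by_cases hxk : x.getD k 0 = v
        · rw [if_pos hxk, if_pos hxk]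
        · rw [if_neg hxk, if_neg hxk]
          rcases Nat.eq_zero_or_pos k with hk0 | hk0
          · subst hk0; simp [h0D]
          · obtain ⟨k', rfl⟩ : ∃ k', k = k' + 1 := ⟨k - 1, by omega⟩
            simp
      rw [hA, hB]
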